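-- pv_equiv track=rewrite | github.com/mal1kc/deneme_sahasi | python/solve_table_rithm.py | get_columns_with_multiple_filled_tiles
-- ===== SOURCE A (Python) =====
-- def remove_items(list_, item_):
--
--     # using list comprehension to perform the task
--     res = [i for i in list_ if i != item_]
--
--     return res
--
-- def get_columns_with_multiple_filled_tiles(filled_tiles:list[list],row_count:int)->set:
--     columns = []
--     checked_columns = []
--     if len(filled_tiles)>0:
--         for t in filled_tiles:
--             checked_columns.append(t[1])
--
--     length_checked_columns = len(checked_columns)
--     for i in range(length_checked_columns):
--         for t in filled_tiles:
--             if checked_columns.count(t[1])==row_count: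
--                 columns.append(t[1])
--                 checked_columns = remove_items(checked_columns,t[1])
--
--     return columns
-- ===== SOURCE B (Python) =====
-- def get_columns_with_multiple_filled_tiles(filled_tiles, row_count):
--     counts = {}
--     for t in filled_tiles:
--         counts[t[1]] = counts.get(t[1], 0) + 1
--     return [col for col, n in counts.items() if n == row_count]
-- ===== Notes on version B (the rewrite author's own statement) =====
-- stated objective: faster
-- what changed: B makes one pass building an insertion-ordered dict of column counts and then filters that table's items, instead of A's outer range loop that rescans the tile list and re-counts/removes from a shrinking checked list.
import Mathlib
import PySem

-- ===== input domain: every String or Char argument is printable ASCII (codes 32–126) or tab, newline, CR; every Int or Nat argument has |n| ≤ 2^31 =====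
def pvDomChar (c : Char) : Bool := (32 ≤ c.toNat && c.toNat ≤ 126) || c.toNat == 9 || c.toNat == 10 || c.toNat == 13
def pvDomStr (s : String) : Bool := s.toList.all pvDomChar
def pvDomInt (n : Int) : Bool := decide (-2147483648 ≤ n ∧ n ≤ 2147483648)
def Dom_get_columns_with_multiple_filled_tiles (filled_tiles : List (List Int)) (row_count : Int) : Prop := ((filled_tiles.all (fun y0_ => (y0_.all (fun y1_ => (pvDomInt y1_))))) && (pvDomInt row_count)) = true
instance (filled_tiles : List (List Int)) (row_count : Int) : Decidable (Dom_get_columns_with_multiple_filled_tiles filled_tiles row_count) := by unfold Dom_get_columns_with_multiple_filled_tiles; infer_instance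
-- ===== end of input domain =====

-- B builds the column counts once in an insertion-ordered dict and filters its items,
-- replacing A's repeated count-and-remove rescans; proved equal on tiles with ≥ 2 entries
-- (on shorter tiles A raises IndexError).

-- ===== PORT A =====
-- t[1] — exact under Pre_ (every tile has length ≥ 2)
def pvCol (t : List Int) : Int := PySem.List.pyGetD t 1 0

-- port of the module helper remove_items
def pvRemoveItems (list_ : List Int) (item_ : Int) : List Int :=
  list_.filter (fun i => i != item_)

def get_columns_with_multiple_filled_tiles (filled_tiles : List (List Int)) (row_count : Int) : List Int :=
  let columns : List Int := []
  let checked_columns : List Int :=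
    if 0 < PySem.List.len filled_tiles then
      filled_tiles.foldl (fun acc t => acc ++ [pvCol t]) []
    else []
  let length_checked_columns : Int := PySem.List.len checked_columns
  let st :=
    (PySem.List.pyRange 0 length_checked_columns).foldl
      (fun st _ =>
        filled_tiles.foldl
          (fun st t =>
            if (PySem.List.count st.2 (pvCol t) : Int) = row_count then
              (st.1 ++ [pvCol t], pvRemoveItems st.2 (pvCol t))
            else st)
          st)
      (columns, checked_columns)
  st.1

-- ===== PORT B =====
def get_columns_with_multiple_filled_tiles_alt (filled_tiles : List (List Int)) (row_count : Int) : List Int :=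
  let counts : PySem.Dict Int Int :=
    filled_tiles.foldl (fun d t => d.insert (pvCol t) (d.getD (pvCol t) 0 + 1)) PySem.Dict.empty
  (counts.items.filter (fun kv => kv.2 == row_count)).map (fun kv => kv.1)

-- ===== PRECONDITION & SPEC =====
-- A (and B) evaluate t[1] on every tile: on a tile with fewer than 2 entries Python raises IndexError.
def Pre_get_columns_with_multiple_filled_tiles (filled_tiles : List (List Int)) (row_count : Int) : Prop :=
  ∀ t ∈ filled_tiles, 2 ≤ t.length
instance (filled_tiles : List (List Int)) (row_count : Int) : Decidable (Pre_get_columns_with_multiple_filled_tiles filled_tiles row_count) := by unfold Pre_get_columns_with_multiple_filled_tiles; infer_instance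

def pvWitness_get_columns_with_multiple_filled_tiles : List (List Int) × Int := ([[0, 1], [2, 1], [0, 3]], 2)

def Spec_get_columns_with_multiple_filled_tiles (filled_tiles : List (List Int)) (row_count : Int) (out : List Int) : Prop := out = get_columns_with_multiple_filled_tiles_alt filled_tiles row_count
instance (filled_tiles : List (List Int)) (row_count : Int) (out : List Int) : Decidable (Spec_get_columns_with_multiple_filled_tiles filled_tiles row_count out) := by unfold Spec_get_columns_with_multiple_filled_tiles; infer_instance

-- ===== CLAIM (what is proved, stated in full; the proofs are below) =====
def Claim_equal_get_columns_with_multiple_filled_tiles : Prop := ∀ (filled_tiles : List (List Int)) (row_count : Int), Dom_get_columns_with_multiple_filled_tiles filled_tiles row_count → Pre_get_columns_with_multiple_filled_tiles filled_tiles row_count → Spec_get_columns_with_multiple_filled_tiles filled_tiles row_count (get_columns_with_multiple_filled_tiles filled_tiles row_count)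

-- ===== LEMMAS AND PROOFS =====

-- A's inner-loop body, keyed on the column value
def pvStep (rc : Int) (st : List Int × List Int) (c : Int) : List Int × List Int :=
  if (PySem.List.count st.2 c : Int) = rc then (st.1 ++ [c], pvRemoveItems st.2 c) else st

-- the checked list after the columns in acc have been removed
def pvFil (cs acc : List Int) : List Int := cs.filter (fun x => !(acc.contains x))

-- the columns A has output after one pass of the inner loop, starting from acc
def pvPassOut (cs : List Int) (rc : Int) : List Int → List Int → List Int
  | [], acc => acc
  | c :: rest, acc =>
    if c ∉ acc ∧ (List.count c cs : Int) = rc then pvPassOut cs rc rest (acc ++ [c])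
    else pvPassOut cs rc rest acc

-- first occurrences (relative to seen) whose total count is rc
def pvFirstKept (cs : List Int) (rc : Int) : List Int → List Int → List Int
  | [], _ => []
  | c :: rest, seen =>
    if c ∈ seen then pvFirstKept cs rc rest seen
    else (if (List.count c cs : Int) = rc then [c] else []) ++ pvFirstKept cs rc rest (seen ++ [c])

lemma pvFil_nil (cs : List Int) : pvFil cs [] = cs := by
  simp [pvFil]

lemma pvCount_fil (cs acc : List Int) (c : Int) :
    List.count c (pvFil cs acc) = if c ∈ acc then 0 else List.count c cs := by
  by_cases h : c ∈ acc
  · rw [if_pos h, List.count_eq_zero]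
    simp [pvFil, List.mem_filter, h]
  · rw [if_neg h, pvFil, List.count_filter (by simp [h])]

lemma pvRemove_fil (cs acc : List Int) (c : Int) :
    pvRemoveItems (pvFil cs acc) c = pvFil cs (acc ++ [c]) := by
  simp only [pvRemoveItems, pvFil, List.filter_filter]
  apply List.filter_congr
  intro x _
  by_cases hx : x = c <;> by_cases hx2 : x ∈ acc <;> simp [hx, hx2]

lemma pvPass (cs : List Int) (rc : Int) (hrc : rc ≠ 0) :
    ∀ (tiles acc : List Int),
      tiles.foldl (pvStep rc) (acc, pvFil cs acc)
        = (pvPassOut cs rc tiles acc, pvFil cs (pvPassOut cs rc tiles acc)) := by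
  intro tiles
  induction tiles with
  | nil => intro acc; simp [pvPassOut]
  | cons c rest ih =>
    intro acc
    simp only [List.foldl_cons]
    by_cases hmem : c ∈ acc
    · have hstep : pvStep rc (acc, pvFil cs acc) c = (acc, pvFil cs acc) := by
        simp [pvStep, PySem.List.count_eq, pvCount_fil, hmem, eq_comm, hrc]
      rw [hstep, show pvPassOut cs rc (c :: rest) acc = pvPassOut cs rc rest acc from by
        rw [pvPassOut]; rw [if_neg (by simp [hmem])]]
      exact ih acc
    · by_cases hc : (List.count c cs : Int) = rc
      · have hstep : pvStep rc (acc, pvFil cs acc) c = (acc ++ [c], pvFil cs (acc ++ [c])) := by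
          rw [pvStep]
          rw [if_pos (by simp [PySem.List.count_eq, pvCount_fil, hmem, hc])]
          rw [pvRemove_fil]
        rw [hstep, show pvPassOut cs rc (c :: rest) acc = pvPassOut cs rc rest (acc ++ [c]) from by
          rw [pvPassOut]; rw [if_pos ⟨hmem, hc⟩]]
        exact ih (acc ++ [c])
      · have hstep : pvStep rc (acc, pvFil cs acc) c = (acc, pvFil cs acc) := by
          rw [pvStep]
          rw [if_neg (by simp [PySem.List.count_eq, pvCount_fil, hmem]; exact hc)]
        rw [hstep, show pvPassOut cs rc (c :: rest) acc = pvPassOut cs rc rest acc from by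
          rw [pvPassOut]; rw [if_neg (by rintro ⟨-, h2⟩; exact hc h2)]]
        exact ih acc

lemma pvPassOut_mono (cs : List Int) (rc : Int) :
    ∀ (tiles acc : List Int), acc ⊆ pvPassOut cs rc tiles acc := by
  intro tiles
  induction tiles with
  | nil => intro acc; simp [pvPassOut]
  | cons c rest ih =>
    intro acc
    rw [pvPassOut]
    split
    · exact List.Subset.trans (by simp) (ih (acc ++ [c]))
    · exact ih acc

lemma pvMem_passOut (cs : List Int) (rc : Int) :
    ∀ (tiles acc : List Int) (c : Int), c ∈ tiles → (List.count c cs : Int) = rc →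
      c ∈ pvPassOut cs rc tiles acc := by
  intro tiles
  induction tiles with
  | nil => intro acc c h; simp at h
  | cons a rest ih =>
    intro acc c hmem hc
    rcases List.mem_cons.mp hmem with h | h
    · subst h
      rw [pvPassOut]
      by_cases ha : c ∈ acc
      · rw [if_neg (by rintro ⟨h1, -⟩; exact h1 ha)]
        exact pvPassOut_mono cs rc rest acc ha
      · rw [if_pos ⟨ha, hc⟩]
        exact pvPassOut_mono cs rc rest (acc ++ [c]) (by simp)
    · rw [pvPassOut]
      split
      · exact ih (acc ++ [a]) c h hc
      · exact ih acc c h hc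

lemma pvPassOut_fix (cs : List Int) (rc : Int) :
    ∀ (tiles acc : List Int), (∀ c ∈ tiles, c ∈ acc ∨ (List.count c cs : Int) ≠ rc) →
      pvPassOut cs rc tiles acc = acc := by
  intro tiles
  induction tiles with
  | nil => intro acc _; simp [pvPassOut]
  | cons c rest ih =>
    intro acc h
    rw [pvPassOut]
    rw [if_neg (by rintro ⟨h1, h2⟩; rcases h c (by simp) with h3 | h3; exact h1 h3; exact h3 h2)]
    exact ih acc (fun x hx => h x (by simp [hx]))

lemma pvFoldl_fix {α β : Type} (f : α → β → α) (st : α) (h : ∀ b, f st b = st) :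
    ∀ l : List β, l.foldl f st = st := by
  intro l
  induction l with
  | nil => rfl
  | cons x xs ih => rw [List.foldl_cons, h x]; exact ih

lemma pvPassOut_eq_firstKept (cs : List Int) (rc : Int) :
    ∀ (tiles seen acc : List Int),
      (∀ x, x ∈ acc ↔ (x ∈ seen ∧ (List.count x cs : Int) = rc)) →
      pvPassOut cs rc tiles acc = acc ++ pvFirstKept cs rc tiles seen := by
  intro tiles
  induction tiles with
  | nil => intro seen acc _; simp [pvPassOut, pvFirstKept]
  | cons c rest ih =>
    intro seen acc hinv
    rw [pvPassOut, pvFirstKept]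
    by_cases hs : c ∈ seen
    · rw [if_pos hs]
      by_cases hc : (List.count c cs : Int) = rc
      · have hacc : c ∈ acc := (hinv c).2 ⟨hs, hc⟩
        rw [if_neg (by rintro ⟨h1, -⟩; exact h1 hacc)]
        exact ih seen acc hinv
      · rw [if_neg (by rintro ⟨-, h2⟩; exact hc h2)]
        exact ih seen acc hinv
    · have hacc : c ∉ acc := fun h => hs ((hinv c).1 h).1
      rw [if_neg hs]
      by_cases hc : (List.count c cs : Int) = rc
      · rw [if_pos ⟨hacc, hc⟩, if_pos hc]
        rw [ih (seen ++ [c]) (acc ++ [c]) (by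
          intro x
          by_cases hx : x = c
          · subst hx; simp [hc]
          · simp only [List.mem_append, List.mem_singleton, hx, or_false]
            exact hinv x)]
        simp
      · rw [if_neg (by rintro ⟨-, h2⟩; exact hc h2), if_neg hc]
        rw [ih (seen ++ [c]) acc (by
          intro x
          by_cases hx : x = c
          · subst hx; simp [hacc, hc]
          · simp only [List.mem_append, List.mem_singleton, hx, or_false]
            exact hinv x)]
        simp

lemma pvFirstKept_eq (cs : List Int) (rc : Int) :
    ∀ (tiles seen : List Int),
      pvFirstKept cs rc tiles seen
        = (List.drop seen.length (PySem.Set.update seen tiles)).filter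
            (fun c => ((List.count c cs : Int) == rc)) := by
  intro tiles
  induction tiles with
  | nil => intro seen; simp [pvFirstKept, PySem.Set.update_nil, List.drop_length]
  | cons c rest ih =>
    intro seen
    rw [pvFirstKept, PySem.Set.update_cons]
    by_cases hs : c ∈ seen
    · rw [if_pos hs, PySem.Set.add_of_mem hs]
      exact ih seen
    · rw [if_neg hs, PySem.Set.add_of_not_mem hs]
      obtain ⟨J, hJ⟩ : ∃ J, PySem.Set.update (seen ++ [c]) rest = (seen ++ [c]) ++ J :=
        ⟨_, PySem.Set.update_eq_append_filter (seen ++ [c]) rest⟩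
      have h1 : List.drop (seen ++ [c]).length (seen ++ [c] ++ J) = J := List.drop_left
      have h2 : List.drop seen.length (seen ++ [c] ++ J) = [c] ++ J := by
        rw [List.append_assoc]; exact List.drop_left
      rw [ih (seen ++ [c]), hJ, h1, h2]
      by_cases hc : (List.count c cs : Int) = rc
      · rw [if_pos hc]
        simp [hc]
      · rw [if_neg hc]
        simp [hc]

lemma pvZeroPass (cs : List Int) :
    ∀ tiles : List Int, (∀ c ∈ tiles, c ∈ cs) →
      tiles.foldl (pvStep 0) ([], cs) = ([], cs) := by
  intro tiles
  induction tiles with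
  | nil => intro _; rfl
  | cons c rest ih =>
    intro h
    have hc : c ∈ cs := h c (by simp)
    have hstep : pvStep 0 (([] : List Int), cs) c = ([], cs) := by
      rw [pvStep]
      rw [if_neg (by
        simp only [PySem.List.count_eq]
        intro hzero
        have : List.count c cs = 0 := by exact_mod_cast hzero
        rw [List.count_eq_zero] at this
        exact this hc)]
    simp only [List.foldl_cons, hstep]
    exact ih (fun x hx => h x (by simp [hx]))

-- B's port computes the first-occurrence columns filtered by total count
lemma pvAlt_eq (filled_tiles : List (List Int)) (rc : Int) :
    get_columns_with_multiple_filled_tiles_alt filled_tiles rc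
      = (PySem.Set.ofList (filled_tiles.map pvCol)).filter
          (fun c => ((List.count c (filled_tiles.map pvCol) : Int) == rc)) := by
  simp only [get_columns_with_multiple_filled_tiles_alt]
  have hfold :
      List.foldl (fun (d : PySem.Dict Int Int) (t : List Int) =>
          d.insert (pvCol t) (d.getD (pvCol t) 0 + 1)) PySem.Dict.empty filled_tiles
        = PySem.Dict.counter (filled_tiles.map pvCol) := by
    rw [← PySem.Dict.foldl_insert_getD_add_one_eq_counter, List.foldl_map]
  rw [hfold, PySem.Dict.items_counter, List.filter_map]
  simp [Function.comp_def]

-- A's port computes the same list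
lemma pvA_eq (filled_tiles : List (List Int)) (rc : Int) :
    get_columns_with_multiple_filled_tiles filled_tiles rc
      = (PySem.Set.ofList (filled_tiles.map pvCol)).filter
          (fun c => ((List.count c (filled_tiles.map pvCol) : Int) == rc)) := by
  simp only [get_columns_with_multiple_filled_tiles]
  have hchecked :
      (if 0 < PySem.List.len filled_tiles then
        filled_tiles.foldl (fun acc t => acc ++ [pvCol t]) []
      else []) = filled_tiles.map pvCol := by
    cases filled_tiles with
    | nil => simp
    | cons t ts =>
      rw [if_pos (by simp [PySem.List.len_eq])]
      rw [PySem.List.foldl_append_singleton_eq_map]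
      rfl
  rw [hchecked]
  set cs : List Int := filled_tiles.map pvCol with hcs
  have hinner : ∀ st : List Int × List Int,
      filled_tiles.foldl
        (fun st t =>
          if (PySem.List.count st.2 (pvCol t) : Int) = rc then
            (st.1 ++ [pvCol t], pvRemoveItems st.2 (pvCol t))
          else st) st
      = cs.foldl (pvStep rc) st := by
    intro st
    rw [hcs, List.foldl_map]
    rfl
  by_cases hrc : rc = 0
  · subst hrc
    have hfix : cs.foldl (pvStep 0) ([], cs) = ([], cs) := pvZeroPass cs cs (fun _ h => h)
    rw [show ∀ l : List Int, l.foldl (fun st (_ : Int) =>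
        filled_tiles.foldl
          (fun st t =>
            if (PySem.List.count st.2 (pvCol t) : Int) = (0:Int) then
              (st.1 ++ [pvCol t], pvRemoveItems st.2 (pvCol t))
            else st) st) (([] : List Int), cs) = ([], cs) from by
      intro l
      apply pvFoldl_fix
      intro b
      rw [hinner]; exact hfix]
    show ([] : List Int) = _
    symm
    rw [List.filter_eq_nil_iff]
    intro c hcmem
    have hc : c ∈ cs := (PySem.Set.mem_ofList _ _).mp hcmem
    simp only [beq_iff_eq]
    intro hzero
    have : List.count c cs = 0 := by exact_mod_cast hzero
    rw [List.count_eq_zero] at this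
    exact this hc
  · by_cases hcs0 : cs = []
    · rw [hcs0]
      simp [PySem.List.pyRange]
    · have hlen : (0:Int) < PySem.List.len cs := by
        simp [PySem.List.len_eq]
        exact List.length_pos_iff.mpr hcs0
      rw [PySem.List.pyRange_one_cons hlen]
      simp only [List.foldl_cons]
      rw [hinner, show (([] : List Int), cs) = (([] : List Int), pvFil cs []) from by rw [pvFil_nil]]
      rw [pvPass cs rc hrc cs []]
      set out := pvPassOut cs rc cs [] with hout
      have hpo : pvPassOut cs rc cs out = out :=
        pvPassOut_fix cs rc cs out (fun c hc => by
          by_cases h : (List.count c cs : Int) = rc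
          · exact Or.inl (by rw [hout]; exact pvMem_passOut cs rc cs [] c hc h)
          · exact Or.inr h)
      have hfix2 : cs.foldl (pvStep rc) (out, pvFil cs out) = (out, pvFil cs out) := by
        have h := pvPass cs rc hrc cs out
        rw [hpo] at h
        exact h
      have houter :
          (PySem.List.pyRange (0 + 1) (PySem.List.len cs)).foldl
            (fun st (_ : Int) =>
              filled_tiles.foldl
                (fun st t =>
                  if (PySem.List.count st.2 (pvCol t) : Int) = rc then
                    (st.1 ++ [pvCol t], pvRemoveItems st.2 (pvCol t))
                  else st) st)
            (out, pvFil cs out) = (out, pvFil cs out) := by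
        apply pvFoldl_fix
        intro b
        rw [hinner]
        exact hfix2
      rw [houter]
      show out = _
      rw [hout, pvPassOut_eq_firstKept cs rc cs [] [] (by intro x; simp)]
      rw [pvFirstKept_eq cs rc cs []]
      simp [PySem.Set.update_nil_left]

-- ===== VERDICT (by name: the statement is the Claim_ definition above) =====
theorem get_columns_with_multiple_filled_tiles_spec : Claim_equal_get_columns_with_multiple_filled_tiles := by
  intro filled_tiles row_count _hdom _hpre
  unfold Spec_get_columns_with_multiple_filled_tiles
  rw [pvA_eq, pvAlt_eq]
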